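-- pv_equiv track=rewrite | github.com/saifullah3396/atria_core | src/atria_core/types/base/_mixins/_repeatable.py | _ungroup_by_repeats
-- ===== SOURCE A (Python) =====
-- from typing import TYPE_CHECKING, Any, Self
--
-- def _ungroup_by_repeats(flat_list: list[Any], counts: list[int]) -> list[list[Any]]:
--     """
--     Split a flat list into groups based on repeat counts.
--
--     Args:
--         flat_list: The flattened list to split
--         counts: List of counts indicating group sizes
--
--     Returns:
--         list[list[Any]]: List of grouped items
--
--     Raises:
--         ValueError: If counts don't match the flat_list length
--
--     Example:
--         >>> _ungroup_by_repeats([1, 2, 3, 4, 5], [2, 3])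
--         [[1, 2], [3, 4, 5]]
--     """
--     if sum(counts) != len(flat_list):
--         raise ValueError(
--             f"Sum of counts ({sum(counts)}) doesn't match list length ({len(flat_list)})"
--         )
--
--     grouped = []
--     idx = 0
--     for count in counts:
--         if count < 0:
--             raise ValueError(f"Count must be non-negative, got {count}")
--         grouped.append(flat_list[idx : idx + count])
--         idx += count
--     return grouped
-- ===== SOURCE B (Python) =====
-- def _ungroup_by_repeats(flat_list, counts):
--     if sum(counts) != len(flat_list):
--         raise ValueError(
--             f"Sum of counts ({sum(counts)}) doesn't match list length ({len(flat_list)})"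
--         )
--     for count in counts:
--         if count < 0:
--             raise ValueError(f"Count must be non-negative, got {count}")
--     # scatter: label every element with its group id, then bucket-append
--     groups = [[] for _ in counts]
--     labels = [g for g, c in enumerate(counts) for _ in range(c)]
--     for g, x in zip(labels, flat_list):
--         groups[g].append(x)
--     return groups
-- ===== Notes on version B (the rewrite author's own statement) =====
-- stated objective: alternative
-- what changed: Replaces A's slicing loop (running index, slice per group) by a scatter/bucket algorithm: pre-allocate one empty bucket per count, expand counts into a per-element group-label list, and append each element to its labelled bucket; no slicing or index arithmetic remains.
import Mathlib
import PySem

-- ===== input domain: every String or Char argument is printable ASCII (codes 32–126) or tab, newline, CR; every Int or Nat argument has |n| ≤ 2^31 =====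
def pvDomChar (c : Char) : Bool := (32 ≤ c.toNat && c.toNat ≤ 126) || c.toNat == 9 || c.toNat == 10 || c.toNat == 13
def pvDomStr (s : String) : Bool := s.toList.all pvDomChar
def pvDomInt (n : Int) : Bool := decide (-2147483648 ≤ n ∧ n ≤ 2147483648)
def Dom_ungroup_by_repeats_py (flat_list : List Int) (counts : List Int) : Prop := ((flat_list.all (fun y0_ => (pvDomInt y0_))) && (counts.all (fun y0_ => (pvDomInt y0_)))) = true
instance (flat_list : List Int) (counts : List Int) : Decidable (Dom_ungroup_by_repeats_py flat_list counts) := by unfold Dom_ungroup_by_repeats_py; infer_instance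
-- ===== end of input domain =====

-- B replaces A's running-index slicing loop by a scatter/bucket algorithm
-- (label each element with its group id, append into pre-allocated buckets);
-- alternative decomposition, same cost; Pre_ excludes A's two ValueError cases.


-- ===== PORT A =====
-- Transliteration of A: the sum check raises (excluded by Pre_); the for-loop
-- threads (grouped, idx) and appends flat_list[idx : idx+count].  The negative-
-- count raise is excluded by Pre_, so the fold simply proceeds.
def ungroup_by_repeats_py (flat_list : List Int) (counts : List Int) : List (List Int) :=
  (counts.foldl
    (fun (st : List (List Int) × Int) count =>
      (st.1 ++ [PySem.List.slice flat_list (some st.2) (some (st.2 + count))], st.2 + count))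
    ([], 0)).1

-- ===== PORT B =====
-- Transliteration of B: groups = [[] for _ in counts]; labels expands each
-- (g, c) of enumerate(counts) into c copies of g (range of a negative count is
-- empty, as List.replicate toNat is); then each (g, x) of zip(labels, flat_list)
-- appends x to groups[g].  The two up-front validation raises are excluded by Pre_.
def ungroup_by_repeats_py_alt (flat_list : List Int) (counts : List Int) : List (List Int) :=
  let groups := counts.map (fun _ => ([] : List Int))
  let labels := (PySem.List.enumerate counts 0).flatMap
    (fun gc => List.replicate gc.2.toNat gc.1)
  (labels.zip flat_list).foldl
    (fun gs p => gs.modify p.1.toNat (fun l => l ++ [p.2])) groups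

-- ===== PRECONDITION & SPEC =====
-- Pre_ excludes exactly the inputs on which A raises ValueError: a counts sum
-- different from the list length, or a negative count.
def Pre_ungroup_by_repeats_py (flat_list : List Int) (counts : List Int) : Prop :=
  counts.sum = (flat_list.length : Int) ∧ ∀ c ∈ counts, 0 ≤ c
instance (flat_list : List Int) (counts : List Int) : Decidable (Pre_ungroup_by_repeats_py flat_list counts) := by unfold Pre_ungroup_by_repeats_py; infer_instance

def pvWitness_ungroup_by_repeats_py : List Int × List Int := ([1, 2, 3, 4, 5], [2, 0, 3])

def Spec_ungroup_by_repeats_py (flat_list : List Int) (counts : List Int) (out : List (List Int)) : Prop := out = ungroup_by_repeats_py_alt flat_list counts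
instance (flat_list : List Int) (counts : List Int) (out : List (List Int)) : Decidable (Spec_ungroup_by_repeats_py flat_list counts out) := by unfold Spec_ungroup_by_repeats_py; infer_instance

-- ===== CLAIM =====
def Claim_equal_ungroup_by_repeats_py : Prop := ∀ (flat_list : List Int) (counts : List Int), Dom_ungroup_by_repeats_py flat_list counts → Pre_ungroup_by_repeats_py flat_list counts → Spec_ungroup_by_repeats_py flat_list counts (ungroup_by_repeats_py flat_list counts)

-- ===== LEMMAS AND PROOFS =====
-- Both ports are proved equal to this simple recursive specification
-- (take one group, recurse on the rest of the list).
def splitSpec : List Int → List Int → List (List Int)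
  | _, [] => []
  | flat, c :: rest => flat.take c.toNat :: splitSpec (flat.drop c.toNat) rest

-- the scatter step of port B
def scatStep (gs : List (List Int)) (p : Int × Int) : List (List Int) :=
  gs.modify p.1.toNat (fun l => l ++ [p.2])

theorem zip_append_split (as bs flat : List Int) :
    (as ++ bs).zip flat = as.zip flat ++ bs.zip (flat.drop as.length) := by
  induction as generalizing flat with
  | nil => simp
  | cons a as ih =>
    cases flat with
    | nil => simp
    | cons x flat => simp [ih]

-- filling bucket 0 with a run of label-0 pairs
theorem fill_zero (k : ℕ) : ∀ (flat g0 : List Int) (gs : List (List Int)),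
    ((List.replicate k (0 : Int)).zip flat).foldl scatStep (g0 :: gs)
      = (g0 ++ flat.take k) :: gs := by
  induction k with
  | zero => intro flat g0 gs; simp
  | succ k ih =>
    intro flat g0 gs
    cases flat with
    | nil => simp
    | cons x flat =>
      simp [List.replicate_succ, scatStep, List.modify, ih, List.append_assoc]

-- shifted labels only touch the tail buckets
theorem shift_fold (L : List (Int × Int)) (h : ∀ p ∈ L, 0 ≤ p.1) :
    ∀ (g0 : List Int) (gs : List (List Int)),
    (L.map (fun p => (p.1 + 1, p.2))).foldl scatStep (g0 :: gs)
      = g0 :: L.foldl scatStep gs := by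
  induction L with
  | nil => intro g0 gs; simp
  | cons p L ih =>
    intro g0 gs
    have hp : 0 ≤ p.1 := h p (List.mem_cons_self ..)
    have ht : (p.1 + 1).toNat = p.1.toNat + 1 := by omega
    simp only [List.map_cons, List.foldl_cons]
    rw [show scatStep (g0 :: gs) (p.1 + 1, p.2)
          = g0 :: scatStep gs p by simp [scatStep, ht, List.modify]]
    exact ih (fun q hq => h q (List.mem_cons_of_mem _ hq)) g0 _

theorem enum_shift (xs : List Int) : ∀ (s : Int),
    PySem.List.enumerate xs s
      = (PySem.List.enumerate xs 0).map (fun p => (p.1 + s, p.2)) := by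
  induction xs with
  | nil => intro s; simp [PySem.List.enumerate_nil]
  | cons x xs ih =>
    intro s
    rw [PySem.List.enumerate_cons, PySem.List.enumerate_cons, ih (s + 1), ih (0 + 1),
      List.map_cons, List.map_map]
    refine congrArg₂ List.cons (by simp) ?_
    apply List.map_congr_left
    intro p _
    simp only [Function.comp_apply]
    congr 1
    omega

theorem labels_nonneg (counts : List Int) :
    ∀ g ∈ (PySem.List.enumerate counts 0).flatMap
        (fun gc => List.replicate gc.2.toNat gc.1), 0 ≤ g := by
  intro g hg
  obtain ⟨gc, hgc, hmem⟩ := List.mem_flatMap.1 hg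
  obtain ⟨k, hk, rfl⟩ := (PySem.List.mem_enumerate_iff _ _ _).1 hgc
  have := List.eq_of_mem_replicate hmem
  simp only [this]
  omega

theorem alt_scat (flat counts : List Int) :
    ungroup_by_repeats_py_alt flat counts
      = (((PySem.List.enumerate counts 0).flatMap
            (fun gc => List.replicate gc.2.toNat gc.1)).zip flat).foldl
          scatStep (counts.map (fun _ => ([] : List Int))) := rfl

-- port B computes splitSpec (no precondition needed)
theorem alt_eq_splitSpec (counts : List Int) : ∀ (flat : List Int),
    ungroup_by_repeats_py_alt flat counts = splitSpec flat counts := by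
  induction counts with
  | nil => intro flat; simp [ungroup_by_repeats_py_alt, splitSpec, PySem.List.enumerate_nil]
  | cons c rest ih =>
    intro flat
    unfold ungroup_by_repeats_py_alt splitSpec
    simp only [List.map_cons, PySem.List.enumerate_cons, List.flatMap_cons]
    rw [enum_shift rest (0 + 1)]
    have hlab := labels_nonneg rest
    set L0 := (PySem.List.enumerate rest 0).flatMap
        (fun gc => List.replicate gc.2.toNat gc.1) with hL0
    have hmapflat : (List.map (fun p => (p.1 + (0 + 1), p.2)) (PySem.List.enumerate rest 0)).flatMap
        (fun gc => List.replicate gc.2.toNat gc.1) = L0.map (fun g => g + 1) := by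
      rw [List.flatMap_map, hL0, List.map_flatMap]
      exact List.flatMap_congr (fun gc _ => by simp [List.map_replicate])
    rw [hmapflat, zip_append_split]
    have hfold : ∀ (init : List (List Int)) (l : List (Int × Int)),
        l.foldl (fun gs p => gs.modify p.1.toNat (fun t => t ++ [p.2])) init
          = l.foldl scatStep init := fun _ _ => rfl
    rw [List.foldl_append, hfold, hfold, fill_zero, List.length_replicate]
    have hzipmap : (L0.map (fun g => g + 1)).zip (flat.drop c.toNat)
        = (L0.zip (flat.drop c.toNat)).map (fun p => (p.1 + 1, p.2)) := by
      rw [List.zip_map_left]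
      rfl
    rw [hzipmap, shift_fold]
    · congr 1
      rw [← ih (flat.drop c.toNat), alt_scat, ← hL0]
    · intro p hp
      exact hlab p.1 (List.of_mem_zip hp).1

-- port A computes splitSpec when every count is nonnegative
theorem a_fold (flat : List Int) : ∀ (counts : List Int), (∀ c ∈ counts, 0 ≤ c) →
    ∀ (idx : ℕ) (acc : List (List Int)),
    (counts.foldl
      (fun (st : List (List Int) × Int) count =>
        (st.1 ++ [PySem.List.slice flat (some st.2) (some (st.2 + count))], st.2 + count))
      (acc, (idx : Int))).1 = acc ++ splitSpec (flat.drop idx) counts := by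
  intro counts
  induction counts with
  | nil => intro _ idx acc; simp [splitSpec]
  | cons c rest ih =>
    intro hc idx acc
    have hc0 : 0 ≤ c := hc c (List.mem_cons_self ..)
    simp only [List.foldl_cons]
    have hcast : (idx : Int) + c = (idx : Int) + ((c.toNat : ℕ) : Int) := by omega
    rw [hcast, PySem.List.slice_natCast_add,
      show (idx : Int) + ((c.toNat : ℕ) : Int) = (((idx + c.toNat : ℕ)) : Int) by push_cast; ring]
    rw [ih (fun x hx => hc x (List.mem_cons_of_mem _ hx)) (idx + c.toNat)]
    simp [splitSpec, List.append_assoc, List.drop_drop]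

theorem a_eq_splitSpec (counts : List Int) (hc : ∀ c ∈ counts, 0 ≤ c)
    (flat : List Int) :
    ungroup_by_repeats_py flat counts = splitSpec flat counts := by
  have := a_fold flat counts hc 0 []
  simpa [ungroup_by_repeats_py] using this

-- ===== VERDICT =====
theorem ungroup_by_repeats_py_spec : Claim_equal_ungroup_by_repeats_py := by
  intro flat_list counts _ hpre
  unfold Spec_ungroup_by_repeats_py
  rw [a_eq_splitSpec counts hpre.2 flat_list, alt_eq_splitSpec counts flat_list]
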